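-- pv_equiv track=rewrite | github.com/amanuelbeyene/Cryptography-encryption-and-decryption-11-algorithms | Security_Assignment.py | myszkowski_encrypt
-- ===== SOURCE A (Python) =====
-- def myszkowski_encrypt(plaintext: str, key: str) -> str:
--     num_cols = len(key)
--     num_rows = (len(plaintext) + num_cols - 1) // num_cols
--     total = num_rows * num_cols
--     plaintext = plaintext.ljust(total, 'X')
--     matrix = []
--     index = 0
--     for _ in range(num_rows):
--         matrix.append([plaintext[index + c] for c in range(num_cols)])
--         index += num_cols
--
--     groups = {}
--     for idx, letter in enumerate(key):
--         groups.setdefault(letter, []).append(idx)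
--
--     result = []
--     for letter in sorted(groups.keys()):
--         cols = groups[letter]
--         if len(cols) == 1:
--             col = cols[0]
--             for r in range(num_rows):
--                 result.append(matrix[r][col])
--         else:
--             for r in range(num_rows):
--                 for col in cols:
--                     result.append(matrix[r][col])
--     return ''.join(result)
-- ===== SOURCE B (Python) =====
-- def myszkowski_encrypt(plaintext: str, key: str) -> str:
--     num_cols = len(key)
--     num_rows = (len(plaintext) + num_cols - 1) // num_cols
--     total = num_rows * num_cols
--     padded = plaintext.ljust(total, 'X')
--     # Rank every cell index by (its column's key letter, the index itself):
--     # equal letters are read row-by-row, ascending column - Myszkowski order.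
--     order = sorted(range(total), key=lambda i: ord(key[i % num_cols]) * total + i)
--     return ''.join(padded[i] for i in order)
-- ===== Notes on version B (the rewrite author's own statement) =====
-- stated objective: alternative
-- what changed: B drops A's row matrix and letter-grouping dict entirely: it sorts the cell indices 0..total-1 once by the single integer rank ord(key[i%cols])*total+i (column letter, then position) and emits the padded plaintext in that order; Pre_ excludes only key='', where both programs raise ZeroDivisionError.
import Mathlib
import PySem

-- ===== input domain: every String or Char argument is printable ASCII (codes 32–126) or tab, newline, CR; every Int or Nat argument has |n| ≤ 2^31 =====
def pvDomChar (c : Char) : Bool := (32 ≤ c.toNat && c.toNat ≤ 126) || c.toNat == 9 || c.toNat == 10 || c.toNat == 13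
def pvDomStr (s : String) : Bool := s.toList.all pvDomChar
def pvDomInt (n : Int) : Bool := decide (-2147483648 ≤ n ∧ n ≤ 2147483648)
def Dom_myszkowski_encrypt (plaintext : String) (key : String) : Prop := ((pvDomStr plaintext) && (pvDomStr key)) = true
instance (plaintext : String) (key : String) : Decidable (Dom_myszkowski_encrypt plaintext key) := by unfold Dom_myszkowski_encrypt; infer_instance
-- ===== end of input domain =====

-- B replaces A's row matrix and letter-grouping dict by one sort of the cell
-- indices by the integer rank ord(key[i % cols]) * total + i (alternative decomposition).
-- Both programs raise ZeroDivisionError on key = "" (excluded by Pre_).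

-- ===== PORT A =====
-- All integers in A are nonnegative, so Python's `//` is Nat division and every
-- index is in range; indexing is ported with getD (never out of range here).
def myszkowski_encrypt (plaintext : String) (key : String) : String :=
  let pt := plaintext.toList
  let k := key.toList
  let num_cols := k.length
  let num_rows := (pt.length + num_cols - 1) / num_cols
  let total := num_rows * num_cols
  -- plaintext.ljust(total, 'X'): total ≥ len(plaintext), so it appends X's
  let padded := pt ++ List.replicate (total - pt.length) 'X'
  let matrix := ((List.range num_rows).foldl
      (fun (st : List (List Char) × Nat) _ =>
        (st.1 ++ [(List.range num_cols).map (fun c => padded.getD (st.2 + c) 'X')],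
         st.2 + num_cols))
      ([], 0)).1
  -- groups.setdefault(letter, []).append(idx)  ==  d[letter] = d.get(letter, []) + [idx]
  let groups : PySem.Dict Char (List Int) :=
    (PySem.List.enumerate k).foldl (fun d p => d.modify p.2 [] (· ++ [p.1])) PySem.Dict.empty
  let result := (PySem.List.sorted groups.keys (fun x => x) false).foldl
      (fun (res : List Char) letter =>
        let cols := groups.getD letter []
        if cols.length == 1 then
          let col := cols.getD 0 0
          (List.range num_rows).foldl (fun res r =>
            res ++ [(matrix.getD r []).getD col.toNat 'X']) res
        else
          (List.range num_rows).foldl (fun res r =>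
            cols.foldl (fun res col =>
              res ++ [(matrix.getD r []).getD col.toNat 'X']) res) res)
      []
  String.ofList result

-- ===== PORT B =====
def myszkowski_encrypt_alt (plaintext : String) (key : String) : String :=
  let pt := plaintext.toList
  let k := key.toList
  let num_cols := k.length
  let num_rows := (pt.length + num_cols - 1) / num_cols
  let total := num_rows * num_cols
  let padded := pt ++ List.replicate (total - pt.length) 'X'
  -- sorted(range(total), key=lambda i: ord(key[i % num_cols]) * total + i);
  -- i % num_cols ≥ 0 (positive divisor), so .toNat is exact, and the index is in range
  let order := PySem.List.sorted (PySem.List.pyRange 0 (total : Int) 1)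
      (fun i => ((k.getD (PySem.Int.mod i (num_cols : Int)).toNat 'X').toNat : Int) * total + i) false
  String.ofList (order.map (fun i => padded.getD i.toNat 'X'))

-- ===== PRECONDITION & SPEC =====
-- Pre_ excludes exactly key = "", on which BOTH programs raise ZeroDivisionError.
def Pre_myszkowski_encrypt (plaintext : String) (key : String) : Prop := key ≠ ""
instance (plaintext : String) (key : String) : Decidable (Pre_myszkowski_encrypt plaintext key) := by
  unfold Pre_myszkowski_encrypt; infer_instance
def pvWitness_myszkowski_encrypt : String × String := ("HELLO WORLD", "tomato")
def Spec_myszkowski_encrypt (plaintext : String) (key : String) (out : String) : Prop := out = myszkowski_encrypt_alt plaintext key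
instance (plaintext : String) (key : String) (out : String) : Decidable (Spec_myszkowski_encrypt plaintext key out) := by unfold Spec_myszkowski_encrypt; infer_instance

-- ===== CLAIM (what is proved, stated in full; the proofs are below) =====
def Claim_equal_myszkowski_encrypt : Prop := ∀ (plaintext : String) (key : String), Dom_myszkowski_encrypt plaintext key → Pre_myszkowski_encrypt plaintext key → Spec_myszkowski_encrypt plaintext key (myszkowski_encrypt plaintext key)


-- ===== LEMMAS AND PROOFS =====

-- ---- proof-side abbreviations ----
def pvR (pt k : List Char) : Nat := (pt.length + k.length - 1) / k.length
def pvT (pt k : List Char) : Nat := pvR pt k * k.length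
def pvPad (pt k : List Char) : List Char := pt ++ List.replicate (pvT pt k - pt.length) 'X'
def pvCols (k : List Char) (l : Char) : List Nat :=
  (List.range k.length).filter (fun c => k.getD c 'X' == l)
def pvLetters (k : List Char) : List Char := PySem.List.sorted (PySem.Set.ofList k) (fun x => x) false
-- the Myszkowski reading order, as a list of cell indices
def pvL (pt k : List Char) : List Nat :=
  (pvLetters k).flatMap (fun l =>
    (List.range (pvR pt k)).flatMap (fun r => (pvCols k l).map (fun c => r * k.length + c)))

-- ---- generic permutation helpers ----
theorem pv_flatMap_append_perm {b g : Type} (ys : List b) (f h : b -> List g) :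
    (ys.flatMap f ++ ys.flatMap h).Perm (ys.flatMap (fun y => f y ++ h y)) := by
  induction ys with
  | nil => simp
  | cons y ys ih =>
      simp only [List.flatMap_cons, List.append_assoc]
      exact List.Perm.append_left (f y)
        ((List.perm_append_comm_assoc _ _ _).trans (List.Perm.append_left _ ih))

theorem pv_flatMap_swap_perm {a b g : Type} (xs : List a) (ys : List b) (f : a -> b -> List g) :
    (xs.flatMap (fun x => ys.flatMap (fun y => f x y))).Perm
      (ys.flatMap (fun y => xs.flatMap (fun x => f x y))) := by
  induction xs with
  | nil => simp
  | cons x xs ih =>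
      simp only [List.flatMap_cons]
      exact (List.Perm.append_left _ ih).trans (pv_flatMap_append_perm ys (f x) _)

theorem pv_partition_perm {a k : Type} [DecidableEq k] (ds : List k) (xs : List a) (f : a -> k)
    (hnd : ds.Nodup) (hcov : ∀ x ∈ xs, f x ∈ ds) :
    (ds.flatMap (fun l => xs.filter (fun x => f x == l))).Perm xs := by
  induction ds generalizing xs with
  | nil =>
      have : xs = [] := by
        cases xs with
        | nil => rfl
        | cons x t => exact absurd (hcov x (by simp)) (by simp)
      simp [this]
  | cons d ds ih =>
      simp only [List.flatMap_cons]
      have hnd' := hnd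
      rw [List.nodup_cons] at hnd'
      have hrest : ds.flatMap (fun l => xs.filter (fun x => f x == l))
          = ds.flatMap (fun l => (xs.filter (fun x => !(f x == d))).filter (fun x => f x == l)) := by
        apply List.flatMap_congr
        intro l hl
        rw [List.filter_filter]
        apply List.filter_congr
        intro x _
        by_cases h : f x = l
        · have : l ≠ d := fun e => hnd'.1 (e ▸ hl)
          simp [h, this]
        · simp [h]
      rw [hrest]
      have hp := ih (xs.filter (fun x => !(f x == d))) hnd'.2 ?cov
      case cov =>
        intro x hx
        rw [List.mem_filter] at hx
        have hm := hcov x hx.1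
        simp only [List.mem_cons] at hm
        rcases hm with h | h
        · rw [h] at hx; simp at hx
        · exact h
      exact (List.Perm.append_left _ hp).trans (List.filter_append_perm _ xs)

theorem pv_map_eq_flatten_singleton {a b : Type} (f : a -> b) (l : List a) :
    l.map f = (l.map (fun x => [f x])).flatten := by
  induction l with
  | nil => rfl
  | cons x xs ih => simp [ih]

-- ---- basic facts about the reading order ----
theorem pv_mem_cols {k : List Char} {l : Char} {c : Nat} (h : c ∈ pvCols k l) :
    c < k.length ∧ k.getD c 'X' = l := by
  unfold pvCols at h
  simp only [List.mem_filter, List.mem_range, beq_iff_eq] at h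
  exact h

theorem pv_idx_lt {pt k : List Char} {l : Char} {r c : Nat}
    (hr : r < pvR pt k) (hc : c ∈ pvCols k l) : r * k.length + c < pvT pt k := by
  have h1 := (pv_mem_cols hc).1
  unfold pvT
  nlinarith [Nat.mul_le_mul_right k.length hr]

theorem pv_range_mul (R C : Nat) :
    (List.range R).flatMap (fun r => (List.range C).map (fun c => r * C + c)) = List.range (R * C) := by
  induction R with
  | zero => simp
  | succ R ih =>
      rw [List.range_succ, List.flatMap_append, ih, Nat.succ_mul, List.range_add]
      simp

theorem pv_letters_nodup (k : List Char) : (pvLetters k).Nodup := by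
  unfold pvLetters
  exact (PySem.List.sorted_perm _ _ _).symm.nodup (PySem.Set.nodup_ofList k)

theorem pv_mem_letters (k : List Char) (c : Char) : c ∈ pvLetters k ↔ c ∈ k := by
  unfold pvLetters
  rw [PySem.List.mem_sorted, PySem.Set.mem_ofList]

theorem pv_L_perm_range (pt k : List Char) :
    (pvL pt k).Perm (List.range (pvT pt k)) := by
  unfold pvL pvT
  refine (pv_flatMap_swap_perm _ _ _).trans ?_
  rw [← pv_range_mul (pvR pt k) k.length]
  apply List.Perm.flatMap_left
  intro r _
  have h1 : (pvLetters k).flatMap (fun l => (pvCols k l).map (fun c => r * k.length + c))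
      = ((pvLetters k).flatMap (fun l => pvCols k l)).map (fun c => r * k.length + c) := by
    rw [List.map_flatMap]
  rw [h1]
  apply List.Perm.map
  apply pv_partition_perm _ _ _ (pv_letters_nodup k)
  intro c hc
  rw [pv_mem_letters]
  rw [List.mem_range] at hc
  rw [List.getD_eq_getElem _ _ hc]
  exact List.getElem_mem hc

-- B's sort key, computed on a cell r*C+c of letter l
theorem pv_gN_cell {pt k : List Char} {l : Char} {r c : Nat} (hc : c ∈ pvCols k l) :
    (k.getD ((r * k.length + c) % k.length) 'X').toNat * pvT pt k + (r * k.length + c)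
      = l.toNat * pvT pt k + (r * k.length + c) := by
  obtain ⟨h1, h2⟩ := pv_mem_cols hc
  have h3 : (r * k.length + c) % k.length = c := by
    rw [Nat.add_comm, Nat.add_mul_mod_self_right, Nat.mod_eq_of_lt h1]
  rw [h3, h2]

theorem pv_L_pairwise (pt k : List Char) :
    (pvL pt k).Pairwise (fun a b =>
      (k.getD (a % k.length) 'X').toNat * pvT pt k + a
        < (k.getD (b % k.length) 'X').toNat * pvT pt k + b) := by
  unfold pvL
  rw [List.pairwise_flatMap]
  constructor
  · -- same letter: the key reduces to the cell index, which increases row-major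
    intro l _
    rw [List.pairwise_flatMap]
    constructor
    · intro r _
      rw [List.pairwise_map]
      have hp : (pvCols k l).Pairwise (· < ·) :=
        List.Pairwise.filter _ List.pairwise_lt_range
      refine hp.imp_of_mem ?_
      intro c1 c2 hm1 hm2 hlt
      rw [pv_gN_cell (pt := pt) hm1, pv_gN_cell (pt := pt) hm2]
      omega
    · refine (List.pairwise_lt_range).imp ?_
      intro r1 r2 hr x hx y hy
      obtain ⟨c1, hc1, rfl⟩ := List.mem_map.mp hx
      obtain ⟨c2, hc2, rfl⟩ := List.mem_map.mp hy
      rw [pv_gN_cell (pt := pt) hc1, pv_gN_cell (pt := pt) hc2]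
      have h1 := (pv_mem_cols hc1).1
      nlinarith [Nat.mul_le_mul_right k.length hr]
  · -- distinct letters, in strictly increasing order
    have hlet : (pvLetters k).Pairwise (· < ·) := PySem.List.sorted_ofList_pairwise_lt k
    refine hlet.imp ?_
    intro l1 l2 hlt x hx y hy
    obtain ⟨r1, hr1, hx⟩ := List.mem_flatMap.mp hx
    obtain ⟨c1, hc1, rfl⟩ := List.mem_map.mp hx
    obtain ⟨r2, hr2, hy⟩ := List.mem_flatMap.mp hy
    obtain ⟨c2, hc2, rfl⟩ := List.mem_map.mp hy
    rw [List.mem_range] at hr1 hr2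
    rw [pv_gN_cell hc1, pv_gN_cell hc2]
    have hx_lt : r1 * k.length + c1 < pvT pt k := pv_idx_lt hr1 hc1
    have hl : l1.toNat < l2.toNat := Nat.lt_of_succ_le hlt
    nlinarith

-- B's sorted call, named: it IS the Myszkowski reading order
theorem pv_B_sorted_eq (pt k : List Char) :
    PySem.List.sorted (PySem.List.pyRange 0 ((pvT pt k : Nat) : Int) 1)
      (fun i => ((k.getD (PySem.Int.mod i (k.length : Int)).toNat 'X').toNat : Int) * ((pvT pt k : Nat) : Int) + i) false
      = (pvL pt k).map (fun n : Nat => (n : Int)) := by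
  apply PySem.List.sorted_eq_of_perm_of_pairwise_lt
  · have h0 : ((((pvT pt k : Nat) : Int)) - 0).toNat = pvT pt k := by
      rw [Int.sub_zero, Int.toNat_natCast]
    have h1 : PySem.List.pyRange 0 ((pvT pt k : Nat) : Int) 1
        = (List.range (pvT pt k)).map (fun n : Nat => (n : Int)) := by
      rw [PySem.List.pyRange_one, h0]
      apply List.map_congr_left
      intro j _
      rw [Int.zero_add]
    rw [h1]
    exact (pv_L_perm_range pt k).map _
  · rw [List.pairwise_map]
    refine (pv_L_pairwise pt k).imp ?_
    intro a b h
    simp only [PySem.Int.mod_natCast, Int.toNat_natCast]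
    exact_mod_cast h

theorem pv_B_eq (pt k : List Char) :
    myszkowski_encrypt_alt (String.ofList pt) (String.ofList k)
      = String.ofList ((pvL pt k).map (fun i => (pvPad pt k).getD i 'X')) := by
  unfold myszkowski_encrypt_alt
  simp only [String.toList_ofList]
  have hs := pv_B_sorted_eq pt k
  unfold pvT pvR at hs
  rw [hs]
  unfold pvPad pvT pvR
  rw [List.map_map]
  congr 1

-- ---- A's loops ----
theorem pv_matrix_foldl (cs : List Char) (C : Nat) (n : Nat) (acc : List (List Char)) (j : Nat) :
    ((List.range n).foldl
      (fun (st : List (List Char) × Nat) _ =>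
        (st.1 ++ [(List.range C).map (fun c => cs.getD (st.2 + c) 'X')], st.2 + C)) (acc, j))
      = (acc ++ (List.range n).map (fun t => (List.range C).map (fun c => cs.getD (j + t * C + c) 'X')),
         j + n * C) := by
  induction n generalizing acc j with
  | zero => simp
  | succ n ih =>
      rw [List.range_succ, List.foldl_append, ih]
      simp only [List.foldl_cons, List.foldl_nil, List.map_append, List.map_cons, List.map_nil,
        List.append_assoc]
      rw [Prod.mk.injEq]
      exact ⟨rfl, by ring⟩

theorem pv_groups_getD (k : List Char) (l : Char) :
    ((PySem.List.enumerate k).foldl (fun d p => d.modify p.2 [] (· ++ [p.1]))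
        (PySem.Dict.empty : PySem.Dict Char (List Int))).getD l []
      = (pvCols k l).map (fun n : Nat => (n : Int)) := by
  have h1 : (PySem.List.enumerate k).foldl (fun d p => d.modify p.2 [] (· ++ [p.1]))
        (PySem.Dict.empty : PySem.Dict Char (List Int))
      = (((PySem.List.enumerate k).map Prod.swap).foldl
          (fun d p => d.modify p.1 [] (· ++ [p.2])) PySem.Dict.empty) := by
    rw [List.foldl_map]
    rfl
  rw [h1, PySem.Dict.getD_foldl_modify_append]
  rw [PySem.List.enumerate_eq_map_pyRange k 'X']
  have h2 : PySem.List.pyRange 0 (PySem.List.len k) 1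
      = (List.range k.length).map (fun n : Nat => (n : Int)) := by
    rw [PySem.List.len, PySem.List.pyRange_one]
    simp only [Int.sub_zero, Int.toNat_natCast]
    apply List.map_congr_left
    intro j _
    rw [Int.zero_add]
  rw [h2]
  unfold pvCols
  simp [Function.comp_def, PySem.List.pyGetD_natCast, List.filter_map]

theorem pv_groups_keys (k : List Char) :
    ((PySem.List.enumerate k).foldl (fun d p => d.modify p.2 [] (· ++ [p.1]))
        (PySem.Dict.empty : PySem.Dict Char (List Int))).keys
      = PySem.Set.ofList k := by
  have h1 : (PySem.List.enumerate k).foldl (fun d p => d.modify p.2 [] (· ++ [p.1]))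
        (PySem.Dict.empty : PySem.Dict Char (List Int))
      = (((PySem.List.enumerate k).map Prod.swap).foldl
          (fun d p => d.modify p.1 [] (· ++ [p.2])) PySem.Dict.empty) := by
    rw [List.foldl_map]
    rfl
  rw [h1]
  rw [PySem.Dict.keys_foldl_modify_key ((PySem.List.enumerate k).map Prod.swap)
      (fun p : Char × Int => p.1) [] (fun _ p => (· ++ [p.2])) PySem.Dict.empty]
  rw [List.map_map]
  have h3 : ((PySem.List.enumerate k).map ((fun p : Char × Int => p.1) ∘ Prod.swap)) = k := by
    have h4 := PySem.List.map_snd_enumerate k 0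
    rw [show ((fun p : Char × Int => p.1) ∘ Prod.swap : Int × Char -> Char) = (fun p => p.2) from by funext p; rfl]
    exact h4
  rw [h3]
  rfl

theorem pv_A_eq (pt k : List Char) :
    myszkowski_encrypt (String.ofList pt) (String.ofList k)
      = String.ofList ((pvL pt k).map (fun i => (pvPad pt k).getD i 'X')) := by
  unfold myszkowski_encrypt
  simp only [String.toList_ofList]
  rw [pv_matrix_foldl]
  simp only [pv_groups_getD, pv_groups_keys, List.nil_append]
  rw [show (pt ++ List.replicate ((pt.length + k.length - 1) / k.length * k.length - pt.length) 'X') = pvPad pt k from rfl]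
  rw [show (pt.length + k.length - 1) / k.length = pvR pt k from rfl]
  set M := List.map (fun t => List.map (fun c => (pvPad pt k).getD (0 + t * k.length + c) 'X') (List.range k.length)) (List.range (pvR pt k)) with hM
  have hstep : ∀ (res : List Char) (l : Char),
      (if ((List.map (fun n : Nat => (n : Int)) (pvCols k l)).length == 1) = true then
        List.foldl (fun res r => res ++
            [(M.getD r []).getD ((List.map (fun n : Nat => (n : Int)) (pvCols k l)).getD 0 0).toNat 'X'])
          res (List.range (pvR pt k))
      else
        List.foldl (fun res r =>
            List.foldl (fun res col => res ++ [(M.getD r []).getD col.toNat 'X'])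
              res (List.map (fun n : Nat => (n : Int)) (pvCols k l)))
          res (List.range (pvR pt k)))
      = res ++ (List.range (pvR pt k)).flatMap
          (fun r => (pvCols k l).map (fun c => (M.getD r []).getD c 'X')) := by
    intro res l
    by_cases h1 : ((List.map (fun n : Nat => (n : Int)) (pvCols k l)).length == 1) = true
    · rw [if_pos h1]
      have h2 : (pvCols k l).length = 1 := by simpa using h1
      obtain ⟨c0, hc0⟩ := List.length_eq_one_iff.mp h2
      rw [hc0]
      simp only [List.map_cons, List.map_nil, List.getD_cons_zero, Int.toNat_natCast]
      rw [PySem.List.foldl_append_singleton_eq_map]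
      congr 1
      exact pv_map_eq_flatten_singleton _ _
    · rw [if_neg h1]
      have h3 : (fun (res : List Char) (r : Nat) =>
          List.foldl (fun res col => res ++ [(M.getD r []).getD col.toNat 'X'])
            res (List.map (fun n : Nat => (n : Int)) (pvCols k l)))
          = (fun res r => res ++ (pvCols k l).map (fun c => (M.getD r []).getD c 'X')) := by
        funext res r
        rw [List.foldl_map, ← PySem.List.foldl_append_singleton_eq_map (fun c => (M.getD r []).getD c 'X')]
        apply PySem.List.foldl_congr_mem
        intro acc c _
        simp
      rw [h3, PySem.List.foldl_append_eq_flatMap]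
  rw [PySem.List.foldl_congr_mem _ _
      (fun (res : List Char) l => res ++ (List.range (pvR pt k)).flatMap
          (fun r => (pvCols k l).map (fun c => (M.getD r []).getD c 'X'))) []
      (fun acc x _ => hstep acc x)]
  rw [PySem.List.foldl_append_eq_flatMap, List.nil_append]
  congr 1
  unfold pvL pvLetters
  rw [List.map_flatMap]
  apply List.flatMap_congr
  intro l _
  rw [List.map_flatMap]
  apply List.flatMap_congr
  intro r hr
  rw [List.map_map]
  apply List.map_congr_left
  intro c hc
  rw [List.mem_range] at hr
  have hcC := (pv_mem_cols hc).1
  rw [hM]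
  rw [PySem.List.getD_map_range _ _ _ _ hr]
  rw [PySem.List.getD_map_range _ _ _ _ hcC]
  simp [Function.comp]

-- ===== VERDICT (by name: the statement is the Claim_ definition above) =====
theorem myszkowski_encrypt_spec : Claim_equal_myszkowski_encrypt := by
  intro plaintext key _hdom _hpre
  unfold Spec_myszkowski_encrypt
  have hA := pv_A_eq plaintext.toList key.toList
  have hB := pv_B_eq plaintext.toList key.toList
  simp only [String.ofList_toList] at hA hB
  rw [hA, hB]
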